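-- pv_equiv track=rewrite | github.com/lenoirgn/MyBegginerWorkPython | ds2023/dsfinale2023.py | paires
-- ===== SOURCE A (Python) =====
-- def paires(chaine:str)->list[str]:
--     """
--     Précondition :
--     Exemple(s) :
--     $$$ paires('note')
--     ['no', 'on', 'nt', 'tn', 'ne', 'en', 'ot', 'to', 'oe', 'eo', 'te', 'et']
--     """
--     paires = []
--     n = len(chaine)
--
--     for i in range(n):
--         for j in range(i + 1, n):
--             paires.append(chaine[i] + chaine[j])
--             paires.append(chaine[j] + chaine[i])
--     lres=[]
--     for i in range(len(paires)):
--         if not paires[i] in paires[i+1:]: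
--             lres.append(paires[i])
--     return lres
-- ===== SOURCE B (Python) =====
-- def paires(chaine: str) -> list[str]:
--     # Single fused pass: an insertion-ordered dict is used as a "move-to-end" set.
--     # Each generated pair is deleted (if present) and reinserted, so at the end the
--     # dict's key order is exactly "keep the last occurrence" -- no intermediate pair
--     # list and no second dedup pass rescanning tails.
--     last = {}
--     n = len(chaine)
--     for i in range(n):
--         for j in range(i + 1, n):
--             for p in (chaine[i] + chaine[j], chaine[j] + chaine[i]):
--                 if p in last:
--                     del last[p]
--                 last[p] = None
--     return list(last)
-- ===== Notes on version B (the rewrite author's own statement) =====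
-- stated objective: faster
-- what changed: B fuses generation and deduplication into one pass: an insertion-ordered dict is used as a move-to-end set (delete + reinsert each generated pair), so the final key order is keep-the-last-occurrence, eliminating A's intermediate pair list and its quadratic tail-rescanning dedup pass.
import Mathlib
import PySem

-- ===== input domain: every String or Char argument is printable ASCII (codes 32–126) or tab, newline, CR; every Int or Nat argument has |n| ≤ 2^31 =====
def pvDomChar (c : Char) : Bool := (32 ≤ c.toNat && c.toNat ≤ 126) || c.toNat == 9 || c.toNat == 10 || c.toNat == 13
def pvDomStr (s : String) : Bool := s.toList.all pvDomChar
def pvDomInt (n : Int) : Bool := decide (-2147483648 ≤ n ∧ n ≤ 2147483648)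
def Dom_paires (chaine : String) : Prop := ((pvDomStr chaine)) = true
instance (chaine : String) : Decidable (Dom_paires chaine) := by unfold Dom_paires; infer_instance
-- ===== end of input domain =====

-- B fuses generation and dedup into one pass over an insertion-ordered dict used as a
-- "move-to-end" set (delete + reinsert), so the final key order is keep-the-last-occurrence;
-- no intermediate pair list and no tail-rescanning dedup pass.


-- ===== PORT A =====
def paires (chaine : String) : List String :=
  let n : Int := PySem.Str.len chaine
  let pairs : List String :=
    (PySem.List.pyRange 0 n 1).foldl (fun ps i =>
      (PySem.List.pyRange (i + 1) n 1).foldl (fun ps j =>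
        -- chaine[i] + chaine[j]: both indices are in range here, so the .getD default is never used
        ps ++ [String.ofList [(PySem.Str.pyGet? chaine i).getD ' ', (PySem.Str.pyGet? chaine j).getD ' ']]
           ++ [String.ofList [(PySem.Str.pyGet? chaine j).getD ' ', (PySem.Str.pyGet? chaine i).getD ' ']]) ps) []
  (PySem.List.pyRange 0 (pairs.length : Int) 1).foldl (fun lres i =>
    if ¬ (PySem.List.pyGetD pairs i "") ∈ PySem.List.slice pairs (some (i + 1)) none then
      lres ++ [PySem.List.pyGetD pairs i ""]
    else lres) []

-- ===== PORT B =====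
-- the body of Source B's innermost 'for p in (…): if p in last: del last[p]; last[p] = None'
def pvStep (d : PySem.Dict String (Option Unit)) (p : String) : PySem.Dict String (Option Unit) :=
  let d' := if d.contains p then d.erase p else d
  d'.insert p none

def paires_alt (chaine : String) : List String :=
  let n : Int := PySem.Str.len chaine
  let last : PySem.Dict String (Option Unit) :=
    (PySem.List.pyRange 0 n 1).foldl (fun d i =>
      (PySem.List.pyRange (i + 1) n 1).foldl (fun d j =>
        [String.ofList [(PySem.Str.pyGet? chaine i).getD ' ', (PySem.Str.pyGet? chaine j).getD ' '],
         String.ofList [(PySem.Str.pyGet? chaine j).getD ' ', (PySem.Str.pyGet? chaine i).getD ' ']].foldl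
          pvStep d) d) PySem.Dict.empty
  last.keys

-- ===== PRECONDITION & SPEC =====
def Spec_paires (chaine : String) (out : List String) : Prop := out = paires_alt chaine
instance (chaine : String) (out : List String) : Decidable (Spec_paires chaine out) := by unfold Spec_paires; infer_instance

-- ===== CLAIM (what is proved, stated in full; the proofs are below) =====
def Claim_equal_paires : Prop := ∀ (chaine : String), Dom_paires chaine → Spec_paires chaine (paires chaine)

-- ===== LEMMAS AND PROOFS =====

-- the two strings contributed by the index pair (i, j)
def pvG (chaine : String) (i j : Int) : List String :=
  [String.ofList [(PySem.Str.pyGet? chaine i).getD ' ', (PySem.Str.pyGet? chaine j).getD ' '],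
   String.ofList [(PySem.Str.pyGet? chaine j).getD ' ', (PySem.Str.pyGet? chaine i).getD ' ']]

-- the full generated pair sequence, as a nested flatMap
def pvPairs (chaine : String) : List String :=
  (PySem.List.pyRange 0 (PySem.Str.len chaine) 1).flatMap (fun i =>
    (PySem.List.pyRange (i + 1) (PySem.Str.len chaine) 1).flatMap (pvG chaine i))

-- A's pair-building double loop produces pvPairs
lemma pairsA_flat (chaine : String) :
    (PySem.List.pyRange 0 (PySem.Str.len chaine) 1).foldl (fun ps i =>
      (PySem.List.pyRange (i + 1) (PySem.Str.len chaine) 1).foldl (fun ps j =>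
        ps ++ [String.ofList [(PySem.Str.pyGet? chaine i).getD ' ', (PySem.Str.pyGet? chaine j).getD ' ']]
           ++ [String.ofList [(PySem.Str.pyGet? chaine j).getD ' ', (PySem.Str.pyGet? chaine i).getD ' ']]) ps) []
    = pvPairs chaine := by
  rw [PySem.List.foldl_congr_mem _ _
    (fun ps i => ps ++ (PySem.List.pyRange (i + 1) (PySem.Str.len chaine) 1).flatMap (pvG chaine i)) []
    ?_]
  · rw [PySem.List.foldl_append_eq_flatMap]
    simp [pvPairs]
  · intro acc i _
    rw [PySem.List.foldl_congr_mem _ _ (fun ps j => ps ++ pvG chaine i j) acc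
      (by intro acc' j _; simp [pvG])]
    rw [PySem.List.foldl_append_eq_flatMap]

-- A's dedup loop keeps the last occurrence of each pair: it is List.dedup (index form)
lemma dedupA_nat (l : List String) :
    ∀ acc, (List.range l.length).foldl
      (fun lres k => if ¬ (l.getD k "") ∈ l.drop (k + 1) then lres ++ [l.getD k ""] else lres) acc
      = acc ++ l.dedup := by
  induction l with
  | nil => intro acc; simp
  | cons x xs ih =>
    intro acc
    rw [List.length_cons, List.range_succ_eq_map, List.foldl_cons, List.foldl_map]
    simp only [List.getD_cons_zero, List.drop_succ_cons, List.drop_zero]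
    rw [PySem.List.foldl_congr_mem (List.range xs.length) _
      (fun lres k => if ¬ (xs.getD k "") ∈ xs.drop (k + 1) then lres ++ [xs.getD k ""] else lres) _
      (by intro acc' k _; simp)]
    rw [ih]
    by_cases hx : x ∈ xs
    · rw [if_neg (by simpa using hx), List.dedup_cons_of_mem hx]
    · rw [if_pos (by simpa using hx), List.dedup_cons_of_notMem hx]
      simp

lemma dedupA_eq (l : List String) :
    (PySem.List.pyRange 0 (l.length : Int) 1).foldl (fun lres i =>
      if ¬ (PySem.List.pyGetD l i "") ∈ PySem.List.slice l (some (i + 1)) none then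
        lres ++ [PySem.List.pyGetD l i ""]
      else lres) []
    = l.dedup := by
  rw [PySem.List.pyRange_zero_nat, List.foldl_map]
  rw [PySem.List.foldl_congr_mem (List.range l.length) _
    (fun lres k => if ¬ (l.getD k "") ∈ l.drop (k + 1) then lres ++ [l.getD k ""] else lres) []
    ?_]
  · exact dedupA_nat l []
  · intro acc k _
    have hcast : ((k : Int) + 1) = ((k + 1 : Nat) : Int) := by push_cast; ring
    rw [hcast, PySem.List.slice_from_natCast, PySem.List.pyGetD_natCast]

lemma paires_eq_dedup (chaine : String) :
    paires chaine = (pvPairs chaine).dedup := by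
  unfold paires
  simp only []
  rw [pairsA_flat, dedupA_eq]

-- one pvStep: the key is removed from wherever it was and appended at the end
lemma items_pvStep (d : PySem.Dict String (Option Unit)) (p : String) :
    (pvStep d p).items = d.items.filter (fun q => !(q.1 == p)) ++ [(p, none)] := by
  unfold pvStep
  by_cases h : d.contains p
  · rw [if_pos h]
    simp [PySem.Dict.insert, PySem.Dict.erase]
  · rw [if_neg h]
    have hfilter : d.items.filter (fun q => !(q.1 == p)) = d.items := by
      apply List.filter_eq_self.mpr
      intro q hq
      simp only [Bool.not_eq_eq_eq_not, Bool.not_true, beq_eq_false_iff_ne]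
      intro hqp
      apply h
      show (d.items.any fun q => q.1 == p) = true
      exact List.any_of_mem hq (by simpa using hqp)
    simp [PySem.Dict.insert, h, hfilter]

lemma keys_pvStep (d : PySem.Dict String (Option Unit)) (p : String) :
    (pvStep d p).keys = d.keys.filter (fun x => !(x == p)) ++ [p] := by
  simp [PySem.Dict.keys, items_pvStep, List.filter_map, Function.comp_def]

-- folding pvStep over a list: final key order is "keep the last occurrence" (= List.dedup)
lemma foldl_pvStep_keys (l : List String) :
    ∀ d : PySem.Dict String (Option Unit),
      (l.foldl pvStep d).keys = d.keys.filter (fun x => decide (x ∉ l)) ++ l.dedup := by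
  induction l with
  | nil => intro d; simp
  | cons p l ih =>
    intro d
    rw [List.foldl_cons, ih, keys_pvStep, List.filter_append, List.filter_filter]
    have hcomb : ∀ m : List String,
        m.filter (fun x => decide (x ∉ l) && !(x == p)) = m.filter (fun x => decide (x ∉ p :: l)) := by
      intro m
      apply List.filter_congr
      intro x _
      by_cases hxp : x = p
      · simp [hxp]
      · by_cases hxl : x ∈ l <;> simp [hxp, hxl]
    rw [hcomb]
    by_cases hp : p ∈ l
    · rw [List.dedup_cons_of_mem hp]
      simp [hp]
    · rw [List.dedup_cons_of_notMem hp]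
      simp [hp]

lemma paires_alt_eq_dedup (chaine : String) :
    paires_alt chaine = (pvPairs chaine).dedup := by
  unfold paires_alt
  simp only []
  have hfold : (pvPairs chaine).foldl pvStep PySem.Dict.empty
      = (PySem.List.pyRange 0 (PySem.Str.len chaine) 1).foldl (fun d i =>
          (PySem.List.pyRange (i + 1) (PySem.Str.len chaine) 1).foldl (fun d j =>
            [String.ofList [(PySem.Str.pyGet? chaine i).getD ' ', (PySem.Str.pyGet? chaine j).getD ' '],
             String.ofList [(PySem.Str.pyGet? chaine j).getD ' ', (PySem.Str.pyGet? chaine i).getD ' ']].foldl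
              pvStep d) d) PySem.Dict.empty := by
    rw [pvPairs]
    simp only [List.foldl_flatMap, pvG]
  rw [← hfold, foldl_pvStep_keys]
  simp [PySem.Dict.empty, PySem.Dict.keys]

-- ===== VERDICT (by name: the statement is the Claim_ definition above) =====
theorem paires_spec : Claim_equal_paires := by
  intro chaine _
  unfold Spec_paires
  rw [paires_eq_dedup, paires_alt_eq_dedup]
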